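-- pv_equiv track=rewrite | github.com/Pressio/od-rom | code/main_create_rectangular_partitions.py | _create1d_new
-- ===== SOURCE A (Python) =====
-- def _mapCellGidsToStateDofsGids(cellGidsDic, numDofsPerCell):
--   d = {}
--
--   if numDofsPerCell == 1:
--     for pCount, pCellGids in cellGidsDic.items():
--       myl = [int(i) for i in pCellGids]
--       d[pCount] = myl
--
--   elif numDofsPerCell == 2:
--     for pCount, pCellGids in cellGidsDic.items():
--       myl = [None]*len(pCellGids)*2
--       myl[0::2] = [int(i*2)   for i in pCellGids]
--       myl[1::2] = [int(i*2+1) for i in pCellGids]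
--       d[pCount] = myl
--
--   elif numDofsPerCell == 3:
--     for pCount, pCellGids in cellGidsDic.items():
--       myl = [None]*len(pCellGids)*3
--       myl[0::3] = [int(i*3)   for i in pCellGids]
--       myl[1::3] = [int(i*3+1) for i in pCellGids]
--       myl[2::3] = [int(i*3+2) for i in pCellGids]
--       d[pCount] = myl
--
--   elif numDofsPerCell == 4:
--     for pCount, pCellGids in cellGidsDic.items():
--       myl = [None]*len(pCellGids)*4
--       myl[0::4] = [int(i*4)   for i in pCellGids]
--       myl[1::4] = [int(i*4+1) for i in pCellGids]
--       myl[2::4] = [int(i*4+2) for i in pCellGids]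
--       myl[3::4] = [int(i*4+3) for i in pCellGids]
--       d[pCount] = myl
--
--   elif numDofsPerCell == 5:
--     for pCount, pCellGids in cellGidsDic.items():
--       myl = [None]*len(pCellGids)*5
--       myl[0::5] = [int(i*5)   for i in pCellGids]
--       myl[1::5] = [int(i*5+1) for i in pCellGids]
--       myl[2::5] = [int(i*5+2) for i in pCellGids]
--       myl[3::5] = [int(i*5+3) for i in pCellGids]
--       myl[4::5] = [int(i*5+4) for i in pCellGids]
--       d[pCount] = myl
--
--   return d
--
-- def _create1d_new(totCellsX, xSplits, ndpc):
--   blockSizes = {}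
--   d = {}
--   blockGid = 0
--   for xgids in xSplits:
--     for i in xgids:
--       cellGid  = i
--       if blockGid in d:
--         d[blockGid].append(cellGid)
--       else:
--         d[blockGid] = [cellGid]
--     blockSizes[blockGid] = [len(xgids)]
--     blockGid += 1
--
--   stateDofsGidsDic = _mapCellGidsToStateDofsGids(d, ndpc)
--   return [blockSizes, d, stateDofsGidsDic]
-- ===== SOURCE B (Python) =====
-- def _create1d_new(totCellsX, xSplits, ndpc):
--   blockSizes = {b: [len(x)] for b, x in enumerate(xSplits)}
--   d = {b: list(x) for b, x in enumerate(xSplits) if x}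
--   if 1 <= ndpc <= 5:
--     stateDofsGidsDic = {b: [int(i*ndpc + k) for i in gids for k in range(ndpc)]
--                         for b, gids in d.items()}
--   else:
--     stateDofsGidsDic = {}
--   return [blockSizes, d, stateDofsGidsDic]
-- ===== Notes on version B (the rewrite author's own statement) =====
-- stated objective: simpler
-- what changed: B builds each dict directly with per-block comprehensions over enumerate (d keeps only non-empty splits, matching A) and replaces the five hand-unrolled stride-slice branches of _mapCellGidsToStateDofsGids with one flat comprehension i*ndpc+k over range(ndpc), guarded by 1 <= ndpc <= 5.
import Mathlib
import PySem

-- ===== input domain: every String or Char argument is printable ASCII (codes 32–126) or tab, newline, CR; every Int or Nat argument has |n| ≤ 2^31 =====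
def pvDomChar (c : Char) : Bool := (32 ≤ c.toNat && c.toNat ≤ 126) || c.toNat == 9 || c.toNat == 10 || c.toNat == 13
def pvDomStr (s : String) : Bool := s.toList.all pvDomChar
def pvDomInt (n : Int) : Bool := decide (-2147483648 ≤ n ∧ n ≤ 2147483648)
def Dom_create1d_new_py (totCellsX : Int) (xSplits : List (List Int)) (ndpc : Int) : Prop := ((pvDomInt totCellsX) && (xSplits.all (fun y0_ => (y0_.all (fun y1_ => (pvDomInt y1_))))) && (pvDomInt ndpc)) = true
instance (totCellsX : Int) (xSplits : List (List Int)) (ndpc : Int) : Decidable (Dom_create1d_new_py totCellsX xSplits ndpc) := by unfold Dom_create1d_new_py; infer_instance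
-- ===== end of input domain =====

-- B replaces A's incremental per-cell dict appends and the five hand-unrolled stride-slice
-- branches by direct per-block comprehensions over enumerate (objective: simpler).

-- ===== PORT A =====
-- inner `for i in xgids:` loop of _create1d_new (d[blockGid].append = modify with list append)
def pvA_cellLoop (blockGid : Int) (d : PySem.Dict Int (List Int)) : List Int → PySem.Dict Int (List Int)
  | [] => d
  | i :: rest =>
      pvA_cellLoop blockGid
        (if d.contains blockGid then d.modify blockGid [] (fun l => l ++ [i])
         else d.insert blockGid [i]) rest

-- outer `for xgids in xSplits:` loop carrying (blockSizes, d, blockGid)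
def pvA_outer : List (List Int) → PySem.Dict Int (List Int) → PySem.Dict Int (List Int) → Int →
    PySem.Dict Int (List Int) × PySem.Dict Int (List Int)
  | [], blockSizes, d, _ => (blockSizes, d)
  | xgids :: rest, blockSizes, d, blockGid =>
      pvA_outer rest (blockSizes.insert blockGid [(xgids.length : Int)])
        (pvA_cellLoop blockGid d xgids) (blockGid + 1)

-- hand port of `myl[cnt::step] = vals` (extended-slice assignment of an equal-length list:
-- exact here because every branch assigns lists of exactly the slice's length)
def pvSetStride : List (Option Int) → Nat → Nat → List Int → List (Option Int)
  | [], _, _, _ => []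
  | x :: xs, 0, step, vs =>
      match vs with
      | [] => x :: xs
      | v :: vs' => some v :: pvSetStride xs (step - 1) step vs'
  | x :: xs, Nat.succ k, step, vs => x :: pvSetStride xs k step vs

-- the `[None]*…` placeholders are all overwritten; reading them back drops the Option
def pvUnopt (l : List (Option Int)) : List Int := l.map (fun o => o.getD 0)

-- port of _mapCellGidsToStateDofsGids (the `for pCount, pCellGids in cellGidsDic.items()` loops)
def pvMapCellGids (cellGidsDic : PySem.Dict Int (List Int)) (numDofsPerCell : Int) :
    PySem.Dict Int (List Int) :=
  if numDofsPerCell = 1 then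
    cellGidsDic.items.foldl (fun dd p => dd.insert p.1 (p.2.map (fun i => i))) PySem.Dict.empty
  else if numDofsPerCell = 2 then
    cellGidsDic.items.foldl (fun dd p =>
      let myl0 := List.replicate (p.2.length * 2) (none : Option Int)
      let myl1 := pvSetStride myl0 0 2 (p.2.map (fun i => i * 2))
      let myl2 := pvSetStride myl1 1 2 (p.2.map (fun i => i * 2 + 1))
      dd.insert p.1 (pvUnopt myl2)) PySem.Dict.empty
  else if numDofsPerCell = 3 then
    cellGidsDic.items.foldl (fun dd p =>
      let myl0 := List.replicate (p.2.length * 3) (none : Option Int)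
      let myl1 := pvSetStride myl0 0 3 (p.2.map (fun i => i * 3))
      let myl2 := pvSetStride myl1 1 3 (p.2.map (fun i => i * 3 + 1))
      let myl3 := pvSetStride myl2 2 3 (p.2.map (fun i => i * 3 + 2))
      dd.insert p.1 (pvUnopt myl3)) PySem.Dict.empty
  else if numDofsPerCell = 4 then
    cellGidsDic.items.foldl (fun dd p =>
      let myl0 := List.replicate (p.2.length * 4) (none : Option Int)
      let myl1 := pvSetStride myl0 0 4 (p.2.map (fun i => i * 4))
      let myl2 := pvSetStride myl1 1 4 (p.2.map (fun i => i * 4 + 1))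
      let myl3 := pvSetStride myl2 2 4 (p.2.map (fun i => i * 4 + 2))
      let myl4 := pvSetStride myl3 3 4 (p.2.map (fun i => i * 4 + 3))
      dd.insert p.1 (pvUnopt myl4)) PySem.Dict.empty
  else if numDofsPerCell = 5 then
    cellGidsDic.items.foldl (fun dd p =>
      let myl0 := List.replicate (p.2.length * 5) (none : Option Int)
      let myl1 := pvSetStride myl0 0 5 (p.2.map (fun i => i * 5))
      let myl2 := pvSetStride myl1 1 5 (p.2.map (fun i => i * 5 + 1))
      let myl3 := pvSetStride myl2 2 5 (p.2.map (fun i => i * 5 + 2))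
      let myl4 := pvSetStride myl3 3 5 (p.2.map (fun i => i * 5 + 3))
      let myl5 := pvSetStride myl4 4 5 (p.2.map (fun i => i * 5 + 4))
      dd.insert p.1 (pvUnopt myl5)) PySem.Dict.empty
  else PySem.Dict.empty

def create1d_new_py (totCellsX : Int) (xSplits : List (List Int)) (ndpc : Int) :
    List (List (Int × List Int)) :=
  let r := pvA_outer xSplits PySem.Dict.empty PySem.Dict.empty 0
  [r.1.items, r.2.items, (pvMapCellGids r.2 ndpc).items]

-- ===== PORT B =====
def create1d_new_py_alt (totCellsX : Int) (xSplits : List (List Int)) (ndpc : Int) :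
    List (List (Int × List Int)) :=
  let blockSizes := (PySem.List.enumerate xSplits).map (fun p => (p.1, [(p.2.length : Int)]))
  let d := ((PySem.List.enumerate xSplits).filter (fun p => !p.2.isEmpty)).map (fun p => (p.1, p.2))
  let stateDofsGidsDic :=
    if 1 ≤ ndpc ∧ ndpc ≤ 5 then
      d.map (fun q => (q.1, q.2.flatMap (fun i => (PySem.List.pyRange 0 ndpc 1).map (fun k => i * ndpc + k))))
    else []
  [blockSizes, d, stateDofsGidsDic]

-- ===== PRECONDITION & SPEC =====
def Spec_create1d_new_py (totCellsX : Int) (xSplits : List (List Int)) (ndpc : Int) (out : List (List (Int × List Int))) : Prop := out = create1d_new_py_alt totCellsX xSplits ndpc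
instance (totCellsX : Int) (xSplits : List (List Int)) (ndpc : Int) (out : List (List (Int × List Int))) : Decidable (Spec_create1d_new_py totCellsX xSplits ndpc out) := by unfold Spec_create1d_new_py; infer_instance

-- ===== CLAIM (what is proved, stated in full; the proofs are below) =====
def Claim_equal_create1d_new_py : Prop := ∀ (totCellsX : Int) (xSplits : List (List Int)) (ndpc : Int), Dom_create1d_new_py totCellsX xSplits ndpc → Spec_create1d_new_py totCellsX xSplits ndpc (create1d_new_py totCellsX xSplits ndpc)

-- ===== LEMMAS AND PROOFS =====

-- appending [i] to the value stored at the (unique, last) key b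
lemma pvDict_modify_last (b : Int) (l : List (Int × List Int)) (hb : ∀ p ∈ l, p.1 ≠ b)
    (acc : List Int) (i : Int) :
    (PySem.Dict.mk (l ++ [(b, acc)])).modify b [] (fun v => v ++ [i]) =
      ⟨l ++ [(b, acc ++ [i])]⟩ := by
  have hf : l.find? (fun p => p.1 == b) = none := by
    rw [List.find?_eq_none]; intro p hp; simpa using hb p hp
  have hc : (PySem.Dict.mk (l ++ [(b, acc)])).contains b = true := by
    simp [PySem.Dict.contains]
  have hmap : List.map (fun p => if p.1 = b then (b, acc ++ [i]) else p) l = l := by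
    conv_rhs => rw [← List.map_id l]
    apply List.map_congr_left; intro p hp; simp [hb p hp]
  simp [PySem.Dict.modify, PySem.Dict.insert, PySem.Dict.getD, PySem.Dict.get?, hc, hf, hmap]

-- once cellLoop's key sits last in the dict, the remaining appends extend its value in place
lemma pvA_cellLoop_go (b : Int) (l : List (Int × List Int)) (hb : ∀ p ∈ l, p.1 ≠ b) :
    ∀ (rest acc : List Int),
      pvA_cellLoop b ⟨l ++ [(b, acc)]⟩ rest = ⟨l ++ [(b, acc ++ rest)]⟩ := by
  intro rest
  induction rest with
  | nil => intro acc; simp [pvA_cellLoop]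
  | cons i rest ih =>
    intro acc
    have hc : (PySem.Dict.mk (l ++ [(b, acc)])).contains b = true := by
      simp [PySem.Dict.contains]
    rw [pvA_cellLoop, if_pos hc, pvDict_modify_last b l hb acc i, ih (acc ++ [i])]
    simp

-- the whole inner loop: a fresh key collects exactly xgids (nothing when xgids is empty)
lemma pvA_cellLoop_spec (b : Int) (l : List (Int × List Int)) (hb : ∀ p ∈ l, p.1 ≠ b) :
    ∀ xgids, pvA_cellLoop b ⟨l⟩ xgids =
      ⟨l ++ if xgids.isEmpty then [] else [(b, xgids)]⟩ := by
  intro xgids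
  cases xgids with
  | nil => simp [pvA_cellLoop]
  | cons i rest =>
    have hc : (PySem.Dict.mk l).contains b = false := by
      simp [PySem.Dict.contains]; exact fun a v hv => hb (a, v) hv
    have hins : (PySem.Dict.mk l).insert b [i] = ⟨l ++ [(b, [i])]⟩ := by
      simp [PySem.Dict.insert, hc]
    rw [pvA_cellLoop, if_neg (by simp [hc]), hins, pvA_cellLoop_go b l hb rest [i]]
    simp

-- the outer loop appends one blockSizes entry per split and one d entry per nonempty split
lemma pvA_outer_spec :
    ∀ (xs : List (List Int)) (bl dl : List (Int × List Int)) (g : Int),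
      (∀ p ∈ bl, p.1 < g) → (∀ p ∈ dl, p.1 < g) →
      pvA_outer xs ⟨bl⟩ ⟨dl⟩ g =
        (⟨bl ++ (PySem.List.enumerate xs g).map (fun p => (p.1, [(p.2.length : Int)]))⟩,
         ⟨dl ++ ((PySem.List.enumerate xs g).filter (fun p => !p.2.isEmpty)).map (fun p => (p.1, p.2))⟩) := by
  intro xs
  induction xs with
  | nil => intro bl dl g _ _; simp [pvA_outer, PySem.List.enumerate]
  | cons xgids rest ih =>
    intro bl dl g hbl hdl
    have hcb : (PySem.Dict.mk bl).contains g = false := by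
      simp [PySem.Dict.contains]; exact fun a v hv => ne_of_lt (hbl (a, v) hv)
    have hins : (PySem.Dict.mk bl).insert g [(xgids.length : Int)] =
        ⟨bl ++ [(g, [(xgids.length : Int)])]⟩ := by
      simp [PySem.Dict.insert, hcb]
    have hcell := pvA_cellLoop_spec g dl (fun p hp => ne_of_lt (hdl p hp)) xgids
    rw [pvA_outer, hins, hcell,
      ih (bl ++ [(g, [(xgids.length : Int)])]) (dl ++ if xgids.isEmpty then [] else [(g, xgids)])
        (g + 1)
        (by intro p hp; rcases List.mem_append.mp hp with h | h
            · exact lt_trans (hbl p h) (by omega)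
            · rw [List.mem_singleton] at h; subst h; simp)
        (by intro p hp; rcases List.mem_append.mp hp with h | h
            · exact lt_trans (hdl p h) (by omega)
            · by_cases he : xgids.isEmpty <;> simp [he] at h
              subst h; simp)]
    rw [PySem.List.enumerate_cons]
    by_cases he : xgids.isEmpty <;> simp [he]

-- folding fresh-key inserts over an assoc list is a map
lemma foldl_insert_fresh (f : Int × List Int → List Int) :
    ∀ (ps acc : List (Int × List Int)),
      (ps.map Prod.fst).Nodup → (∀ p ∈ ps, ∀ q ∈ acc, q.1 ≠ p.1) →
      ps.foldl (fun (dd : PySem.Dict Int (List Int)) p => dd.insert p.1 (f p)) ⟨acc⟩ =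
        ⟨acc ++ ps.map (fun p => (p.1, f p))⟩ := by
  intro ps
  induction ps with
  | nil => intro acc _ _; simp
  | cons p ps ih =>
    intro acc hnd hfresh
    have hc : (PySem.Dict.mk acc).contains p.1 = false := by
      simp [PySem.Dict.contains]; exact fun a v hv => hfresh p (by simp) (a, v) hv
    have hins : (PySem.Dict.mk acc).insert p.1 (f p) = ⟨acc ++ [(p.1, f p)]⟩ := by
      simp [PySem.Dict.insert, hc]
    rw [List.foldl_cons, hins,
      ih (acc ++ [(p.1, f p)]) (by simpa using hnd.of_cons)
        (by intro p' hp' q hq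
            rcases List.mem_append.mp hq with h | h
            · exact hfresh p' (by simp [hp']) q h
            · rw [List.mem_singleton] at h; subst h
              have hnotin : p.1 ∉ ps.map Prod.fst :=
                (List.nodup_cons.mp (by simpa using hnd)).1
              intro hcontra
              apply hnotin
              have hm := List.mem_map_of_mem (f := Prod.fst) hp'
              simpa [← hcontra] using hm)]
    simp

lemma stride2 : ∀ (g : List Int),
    pvUnopt (pvSetStride (pvSetStride (List.replicate (g.length * 2) (none : Option Int)) 0 2
        (g.map (fun i => i * 2))) 1 2 (g.map (fun i => i * 2 + 1)))
      = g.flatMap (fun i => [i * 2, i * 2 + 1]) := by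
  intro g
  induction g with
  | nil => simp [pvUnopt, pvSetStride]
  | cons x g ih =>
    rw [show (x :: g).length * 2 = 2 + g.length * 2 by simp; ring, List.replicate_add]
    simp only [List.replicate, List.map_cons, List.cons_append, List.nil_append,
      pvSetStride, List.flatMap_cons]
    simpa [pvUnopt] using ih

lemma stride3 : ∀ (g : List Int),
    pvUnopt (pvSetStride (pvSetStride (pvSetStride (List.replicate (g.length * 3) (none : Option Int)) 0 3
        (g.map (fun i => i * 3))) 1 3 (g.map (fun i => i * 3 + 1))) 2 3 (g.map (fun i => i * 3 + 2)))
      = g.flatMap (fun i => [i * 3, i * 3 + 1, i * 3 + 2]) := by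
  intro g
  induction g with
  | nil => simp [pvUnopt, pvSetStride]
  | cons x g ih =>
    rw [show (x :: g).length * 3 = 3 + g.length * 3 by simp; ring, List.replicate_add]
    simp only [List.replicate, List.map_cons, List.cons_append, List.nil_append,
      pvSetStride, List.flatMap_cons]
    simpa [pvUnopt] using ih

lemma stride4 : ∀ (g : List Int),
    pvUnopt (pvSetStride (pvSetStride (pvSetStride (pvSetStride (List.replicate (g.length * 4) (none : Option Int)) 0 4
        (g.map (fun i => i * 4))) 1 4 (g.map (fun i => i * 4 + 1))) 2 4 (g.map (fun i => i * 4 + 2)))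
        3 4 (g.map (fun i => i * 4 + 3)))
      = g.flatMap (fun i => [i * 4, i * 4 + 1, i * 4 + 2, i * 4 + 3]) := by
  intro g
  induction g with
  | nil => simp [pvUnopt, pvSetStride]
  | cons x g ih =>
    rw [show (x :: g).length * 4 = 4 + g.length * 4 by simp; ring, List.replicate_add]
    simp only [List.replicate, List.map_cons, List.cons_append, List.nil_append,
      pvSetStride, List.flatMap_cons]
    simpa [pvUnopt] using ih

lemma stride5 : ∀ (g : List Int),
    pvUnopt (pvSetStride (pvSetStride (pvSetStride (pvSetStride (pvSetStride (List.replicate (g.length * 5) (none : Option Int)) 0 5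
        (g.map (fun i => i * 5))) 1 5 (g.map (fun i => i * 5 + 1))) 2 5 (g.map (fun i => i * 5 + 2)))
        3 5 (g.map (fun i => i * 5 + 3))) 4 5 (g.map (fun i => i * 5 + 4)))
      = g.flatMap (fun i => [i * 5, i * 5 + 1, i * 5 + 2, i * 5 + 3, i * 5 + 4]) := by
  intro g
  induction g with
  | nil => simp [pvUnopt, pvSetStride]
  | cons x g ih =>
    rw [show (x :: g).length * 5 = 5 + g.length * 5 by simp; ring, List.replicate_add]
    simp only [List.replicate, List.map_cons, List.cons_append, List.nil_append,
      pvSetStride, List.flatMap_cons]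
    simpa [pvUnopt] using ih

-- the keys of A's (and B's) d are pairwise distinct (enumerate indices)
lemma pvD_keys_nodup (xs : List (List Int)) :
    ((((PySem.List.enumerate xs).filter (fun p => !p.2.isEmpty)).map (fun p => (p.1, p.2))).map
      Prod.fst).Nodup := by
  have h := (PySem.List.pairwise_lt_enumerate xs 0).filter (fun p => !p.2.isEmpty)
  have h2 := h.map (S := fun a b => a ≠ b) Prod.fst (fun a b hab => ne_of_lt hab)
  simpa [List.Nodup, List.map_map, Function.comp] using h2

-- A's state-dofs dict, for any d with distinct keys, is B's per-block map
lemma pvMapCellGids_items (ps : List (Int × List Int)) (hnd : (ps.map Prod.fst).Nodup) (n : Int) :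
    (pvMapCellGids ⟨ps⟩ n).items =
      if 1 ≤ n ∧ n ≤ 5 then
        ps.map (fun q => (q.1, q.2.flatMap (fun i => (PySem.List.pyRange 0 n 1).map (fun k => i * n + k))))
      else [] := by
  by_cases h : 1 ≤ n ∧ n ≤ 5
  · rw [if_pos h]
    have hn : n = 1 ∨ n = 2 ∨ n = 3 ∨ n = 4 ∨ n = 5 := by omega
    rcases hn with rfl | rfl | rfl | rfl | rfl
    · simp only [pvMapCellGids, PySem.Dict.empty]
      rw [foldl_insert_fresh (fun p => p.2.map (fun i => i)) ps [] hnd (by simp)]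
      simp only [List.nil_append]
      apply List.map_congr_left; intro q _
      have : PySem.List.pyRange 0 1 1 = [0] := by decide
      simp [this]
    · simp only [pvMapCellGids]
      norm_num
      simp only [PySem.Dict.empty]
      rw [foldl_insert_fresh
        (fun p => pvUnopt (pvSetStride (pvSetStride (List.replicate (p.2.length * 2) (none : Option Int)) 0 2
          (p.2.map (fun i => i * 2))) 1 2 (p.2.map (fun i => i * 2 + 1)))) ps [] hnd (by simp)]
      simp only [List.nil_append]
      apply List.map_congr_left; intro q _
      have hr : PySem.List.pyRange 0 2 1 = [0, 1] := by decide
      rw [stride2 q.2]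
      simp [hr]
    · simp only [pvMapCellGids]
      norm_num
      simp only [PySem.Dict.empty]
      rw [foldl_insert_fresh
        (fun p => pvUnopt (pvSetStride (pvSetStride (pvSetStride (List.replicate (p.2.length * 3) (none : Option Int)) 0 3
          (p.2.map (fun i => i * 3))) 1 3 (p.2.map (fun i => i * 3 + 1))) 2 3 (p.2.map (fun i => i * 3 + 2)))) ps [] hnd (by simp)]
      simp only [List.nil_append]
      apply List.map_congr_left; intro q _
      have hr : PySem.List.pyRange 0 3 1 = [0, 1, 2] := by decide
      rw [stride3 q.2]
      simp [hr]
    · simp only [pvMapCellGids]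
      norm_num
      simp only [PySem.Dict.empty]
      rw [foldl_insert_fresh
        (fun p => pvUnopt (pvSetStride (pvSetStride (pvSetStride (pvSetStride (List.replicate (p.2.length * 4) (none : Option Int)) 0 4
          (p.2.map (fun i => i * 4))) 1 4 (p.2.map (fun i => i * 4 + 1))) 2 4 (p.2.map (fun i => i * 4 + 2)))
          3 4 (p.2.map (fun i => i * 4 + 3)))) ps [] hnd (by simp)]
      simp only [List.nil_append]
      apply List.map_congr_left; intro q _
      have hr : PySem.List.pyRange 0 4 1 = [0, 1, 2, 3] := by decide
      rw [stride4 q.2]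
      simp [hr]
    · simp only [pvMapCellGids]
      norm_num
      simp only [PySem.Dict.empty]
      rw [foldl_insert_fresh
        (fun p => pvUnopt (pvSetStride (pvSetStride (pvSetStride (pvSetStride (pvSetStride (List.replicate (p.2.length * 5) (none : Option Int)) 0 5
          (p.2.map (fun i => i * 5))) 1 5 (p.2.map (fun i => i * 5 + 1))) 2 5 (p.2.map (fun i => i * 5 + 2)))
          3 5 (p.2.map (fun i => i * 5 + 3))) 4 5 (p.2.map (fun i => i * 5 + 4)))) ps [] hnd (by simp)]
      simp only [List.nil_append]
      apply List.map_congr_left; intro q _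
      have hr : PySem.List.pyRange 0 5 1 = [0, 1, 2, 3, 4] := by decide
      rw [stride5 q.2]
      simp [hr]
  · rw [if_neg h]
    have h1 : n ≠ 1 := by omega
    have h2 : n ≠ 2 := by omega
    have h3 : n ≠ 3 := by omega
    have h4 : n ≠ 4 := by omega
    have h5 : n ≠ 5 := by omega
    simp [pvMapCellGids, h1, h2, h3, h4, h5, PySem.Dict.empty]

-- ===== VERDICT (by name: the statement is the Claim_ definition above) =====
theorem create1d_new_py_spec : Claim_equal_create1d_new_py := by
  unfold Claim_equal_create1d_new_py
  intro totCellsX xSplits ndpc _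
  unfold Spec_create1d_new_py
  simp only [create1d_new_py, create1d_new_py_alt]
  have hd : pvA_outer xSplits PySem.Dict.empty PySem.Dict.empty 0 =
      (⟨(PySem.List.enumerate xSplits).map (fun p => (p.1, [(p.2.length : Int)]))⟩,
       ⟨((PySem.List.enumerate xSplits).filter (fun p => !p.2.isEmpty)).map (fun p => (p.1, p.2))⟩) := by
    simpa [PySem.Dict.empty] using pvA_outer_spec xSplits [] [] 0 (by simp) (by simp)
  rw [hd]
  have hstate := pvMapCellGids_items
    (((PySem.List.enumerate xSplits).filter (fun p => !p.2.isEmpty)).map (fun p => (p.1, p.2)))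
    (pvD_keys_nodup xSplits) ndpc
  rw [hstate]
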